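-- pv_equiv track=rewrite | github.com/osuTitanic/banchobot | app/beatmaps_curves.py | replace_updated_hitobject_lines
-- ===== SOURCE A (Python) =====
-- def replace_updated_hitobject_lines(content: str, updated_indexes: dict[int, str]) -> str:
--     lines = content.splitlines()
--     new_lines: list[str] = []
--     in_hitobjects = False
--     hitobject_index = 0
--
--     for line in lines:
--         stripped = line.strip()
--
--         if stripped == "[HitObjects]":
--             in_hitobjects = True
--             new_lines.append(line)
--             continue
--
--         if not in_hitobjects:
--             new_lines.append(line)
--             continue
--
--         if not stripped or stripped.startswith("//"):
--             new_lines.append(line)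
--             continue
--
--         new_lines.append(updated_indexes.get(hitobject_index, line))
--         hitobject_index += 1
--
--     return "\n".join(new_lines)
-- ===== SOURCE B (Python) =====
-- def replace_updated_hitobject_lines(content: str, updated_indexes: dict[int, str]) -> str:
--     # Pass 1: collect the absolute line positions of the hitobject lines, in order.
--     lines = content.splitlines()
--     positions = []
--     in_hitobjects = False
--     for i, line in enumerate(lines):
--         stripped = line.strip()
--         if stripped == "[HitObjects]":
--             in_hitobjects = True
--         elif in_hitobjects and stripped and not stripped.startswith("//"):
--             positions.append(i)
--     # Pass 2: patch the lines addressed by the dict, by ordinal -> absolute position.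
--     for ordinal, text in updated_indexes.items():
--         if 0 <= ordinal < len(positions):
--             lines[positions[ordinal]] = text
--     return "\n".join(lines)
-- ===== Notes on version B (the rewrite author's own statement) =====
-- stated objective: alternative
-- what changed: Instead of a single pass that looks up every hitobject line's ordinal in the dict while copying lines, B first collects the absolute positions of hitobject lines and then iterates over the dict's items, patching lines in place by ordinal->position.
import Mathlib
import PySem

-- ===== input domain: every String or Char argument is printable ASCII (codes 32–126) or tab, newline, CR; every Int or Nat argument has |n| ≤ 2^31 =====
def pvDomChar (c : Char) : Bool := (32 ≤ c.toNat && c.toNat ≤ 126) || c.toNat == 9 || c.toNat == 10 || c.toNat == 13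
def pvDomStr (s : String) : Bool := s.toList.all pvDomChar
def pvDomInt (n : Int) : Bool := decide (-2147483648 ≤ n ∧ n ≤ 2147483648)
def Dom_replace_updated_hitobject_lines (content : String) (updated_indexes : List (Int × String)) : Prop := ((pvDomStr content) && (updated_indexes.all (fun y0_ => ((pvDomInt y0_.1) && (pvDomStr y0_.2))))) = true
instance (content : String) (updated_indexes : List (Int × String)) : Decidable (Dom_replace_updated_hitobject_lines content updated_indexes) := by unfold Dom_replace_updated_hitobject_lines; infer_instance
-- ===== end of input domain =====

-- B replaces A's single pass (dict lookup per hitobject line) by two passes: collect the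
-- absolute positions of hitobject lines, then patch lines by iterating the dict's items.

-- ===== PORT A =====
-- the 'for line in lines' loop of A, carrying (in_hitobjects, hitobject_index) and emitting new_lines
def pvAgo (d : PySem.Dict Int String) : List String → Bool → Int → List String
  | [], _, _ => []
  | line :: ls, inH, idx =>
    let stripped := PySem.Str.strip line
    if stripped = "[HitObjects]" then line :: pvAgo d ls true idx
    else if !inH then line :: pvAgo d ls inH idx
    else if stripped = "" ∨ PySem.Str.startswith stripped "//" then line :: pvAgo d ls inH idx
    else d.getD idx line :: pvAgo d ls inH (idx + 1)

def replace_updated_hitobject_lines (content : String) (updated_indexes : List (Int × String)) : String :=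
  PySem.Str.join "\n" (pvAgo (PySem.Dict.ofList updated_indexes) (PySem.Str.splitlines content) false 0)

-- ===== PORT B =====
-- pass 1 of B: absolute positions of hitobject lines (i = enumerate counter)
def pvBpos : List String → Nat → Bool → List Nat
  | [], _, _ => []
  | line :: ls, i, inH =>
    let stripped := PySem.Str.strip line
    if stripped = "[HitObjects]" then pvBpos ls (i + 1) true
    else if inH ∧ ¬ stripped = "" ∧ ¬ PySem.Str.startswith stripped "//" then i :: pvBpos ls (i + 1) inH
    else pvBpos ls (i + 1) inH

-- pass 2 of B: for each (ordinal, text) in the dict's items, patch the addressed line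
-- (positions.getD ordinal.toNat 0 is positions[ordinal]; the guard makes the index in range)
def pvBpatch (positions : List Nat) (lines : List String) (items : List (Int × String)) : List String :=
  items.foldl (fun ls kv =>
    if 0 ≤ kv.1 ∧ kv.1 < (positions.length : Int) then ls.set (positions.getD kv.1.toNat 0) kv.2 else ls) lines

def replace_updated_hitobject_lines_alt (content : String) (updated_indexes : List (Int × String)) : String :=
  let lines := PySem.Str.splitlines content
  let positions := pvBpos lines 0 false
  PySem.Str.join "\n" (pvBpatch positions lines (PySem.Dict.ofList updated_indexes).items)

-- ===== PRECONDITION & SPEC =====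
def Spec_replace_updated_hitobject_lines (content : String) (updated_indexes : List (Int × String)) (out : String) : Prop := out = replace_updated_hitobject_lines_alt content updated_indexes
instance (content : String) (updated_indexes : List (Int × String)) (out : String) : Decidable (Spec_replace_updated_hitobject_lines content updated_indexes out) := by unfold Spec_replace_updated_hitobject_lines; infer_instance

-- ===== CLAIM (what is proved, stated in full; the proofs are below) =====
def Claim_equal_replace_updated_hitobject_lines : Prop := ∀ (content : String) (updated_indexes : List (Int × String)), Dom_replace_updated_hitobject_lines content updated_indexes → Spec_replace_updated_hitobject_lines content updated_indexes (replace_updated_hitobject_lines content updated_indexes)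

-- ===== LEMMAS AND PROOFS =====

-- proof-only: apply, to the m-th position p of P, the replacement d.getD (idx+m) at slot p - i
def pvApply (d : PySem.Dict Int String) (ls : List String) : List Nat → Nat → Int → List String
  | [], _, _ => ls
  | p :: P, i, idx => (pvApply d ls P i (idx + 1)).set (p - i) (d.getD idx (ls.getD (p - i) ""))

theorem pvApply_shift (d : PySem.Dict Int String) (l : String) (ls : List String) (P : List Nat)
    (i : Nat) (idx : Int) (h : ∀ p ∈ P, i < p) :
    pvApply d (l :: ls) P i idx = l :: pvApply d ls P (i + 1) idx := by
  induction P generalizing idx with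
  | nil => rfl
  | cons p P ih =>
    have hp : i < p := h p (by simp)
    have hst : p - i = (p - (i + 1)) + 1 := by omega
    have hP : ∀ q ∈ P, i < q := fun q hq => h q (by simp [hq])
    simp only [pvApply, ih (idx + 1) hP, hst]
    rfl

theorem pvApply_length (d : PySem.Dict Int String) (ls : List String) (P : List Nat) (i : Nat) (idx : Int) :
    (pvApply d ls P i idx).length = ls.length := by
  induction P generalizing idx with
  | nil => rfl
  | cons p P ih => simp [pvApply, ih]

theorem pvBpos_bounds (ls : List String) : ∀ (i : Nat) (inH : Bool), ∀ p ∈ pvBpos ls i inH, i ≤ p ∧ p < i + ls.length := by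
  induction ls with
  | nil => intro i inH p hp; simp [pvBpos] at hp
  | cons l ls ih =>
    intro i inH p hp
    simp only [pvBpos] at hp
    split at hp
    · have := ih (i + 1) true p hp; simp only [List.length_cons]; omega
    · split at hp
      · rcases List.mem_cons.1 hp with h | h
        · subst h; simp only [List.length_cons]; omega
        · have := ih (i + 1) inH p h; simp only [List.length_cons]; omega
      · have := ih (i + 1) inH p hp; simp only [List.length_cons]; omega

theorem pvBpos_pairwise (ls : List String) : ∀ (i : Nat) (inH : Bool), (pvBpos ls i inH).Pairwise (· < ·) := by
  induction ls with
  | nil => intro i inH; simp [pvBpos]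
  | cons l ls ih =>
    intro i inH
    simp only [pvBpos]
    split
    · exact ih (i + 1) true
    · split
      · exact List.Pairwise.cons (fun q hq => by have := pvBpos_bounds ls (i + 1) inH q hq; omega) (ih (i + 1) inH)
      · exact ih (i + 1) inH

set_option maxHeartbeats 1000000 in
theorem pvAgo_eq_apply (d : PySem.Dict Int String) (ls : List String) :
    ∀ (inH : Bool) (idx : Int) (i : Nat), pvAgo d ls inH idx = pvApply d ls (pvBpos ls i inH) i idx := by
  induction ls with
  | nil => intro inH idx i; rfl
  | cons l ls ih =>
    intro inH idx i
    have hshift : ∀ (inH' : Bool) (idx' : Int), pvApply d (l :: ls) (pvBpos ls (i + 1) inH') i idx'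
        = l :: pvApply d ls (pvBpos ls (i + 1) inH') (i + 1) idx' := fun inH' idx' =>
      pvApply_shift d l ls _ i idx' (fun p hp => by have := pvBpos_bounds ls (i + 1) inH' p hp; omega)
    by_cases h1 : PySem.Str.strip l = "[HitObjects]"
    · have e1 : pvAgo d (l :: ls) inH idx = l :: pvAgo d ls true idx := by
        simp only [pvAgo]
        rw [if_pos h1]
      have e2 : pvBpos (l :: ls) i inH = pvBpos ls (i + 1) true := by
        simp only [pvBpos]
        rw [if_pos h1]
      rw [e1, e2, hshift true idx, ih true idx (i + 1)]
    · cases inH with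
      | false =>
        have e1 : pvAgo d (l :: ls) false idx = l :: pvAgo d ls false idx := by
          simp only [pvAgo]
          rw [if_neg h1, if_pos (show (!false) = true from rfl)]
        have e2 : pvBpos (l :: ls) i false = pvBpos ls (i + 1) false := by
          simp only [pvBpos]
          rw [if_neg h1]
          split
          · next hc => simp at hc
          · rfl
        rw [e1, e2, hshift false idx, ih false idx (i + 1)]
      | true =>
        by_cases h3 : PySem.Str.strip l = "" ∨ PySem.Str.startswith (PySem.Str.strip l) "//"
        · have e1 : pvAgo d (l :: ls) true idx = l :: pvAgo d ls true idx := by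
            simp only [pvAgo]
            rw [if_neg h1, if_neg (show ¬((!true) = true) by simp), if_pos h3]
          have e2 : pvBpos (l :: ls) i true = pvBpos ls (i + 1) true := by
            simp only [pvBpos]
            rw [if_neg h1]
            split
            · next hc => exact absurd h3 (by tauto)
            · rfl
          rw [e1, e2, hshift true idx, ih true idx (i + 1)]
        · have hct : (True ∧ ¬PySem.Str.strip l = "" ∧ ¬PySem.Str.startswith (PySem.Str.strip l) "//" = true) :=
            ⟨trivial, fun h => h3 (Or.inl h), fun h => h3 (Or.inr h)⟩
          have e1 : pvAgo d (l :: ls) true idx = d.getD idx l :: pvAgo d ls true (idx + 1) := by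
            simp only [pvAgo]
            rw [if_neg h1, if_neg (show ¬((!true) = true) by simp), if_neg h3]
          have e2 : pvBpos (l :: ls) i true = i :: pvBpos ls (i + 1) true := by
            simp only [pvBpos]
            rw [if_neg h1]
            split
            · rfl
            · next hc => exact absurd hct hc
          rw [e1, e2, ih true (idx + 1) (i + 1)]
          show _ = (pvApply d (l :: ls) (pvBpos ls (i + 1) true) i (idx + 1)).set (i - i)
            (d.getD idx ((l :: ls).getD (i - i) ""))
          rw [hshift true (idx + 1)]
          have hii : i - i = 0 := by omega
          rw [hii]
          rfl

theorem pvApply_getElem? (d : PySem.Dict Int String) (ls : List String) (P : List Nat)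
    (hnd : P.Nodup) (hb : ∀ p ∈ P, p < ls.length) (idx : Int) (j : Nat) :
    (pvApply d ls P 0 idx)[j]? =
      if j ∈ P then some (d.getD (idx + (P.idxOf j : Int)) (ls.getD j "")) else ls[j]? := by
  induction P generalizing idx with
  | nil => simp [pvApply]
  | cons p P ih =>
    have hpl : p < ls.length := hb p (by simp)
    have hnd' : P.Nodup := hnd.of_cons
    have hb' : ∀ q ∈ P, q < ls.length := fun q hq => hb q (by simp [hq])
    simp only [pvApply, Nat.sub_zero]
    by_cases hj : j = p
    · subst hj
      have hlen : j < (pvApply d ls P 0 (idx + 1)).length := by rw [pvApply_length]; exact hpl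
      rw [List.getElem?_set_self hlen]
      simp [List.idxOf_cons_self]
    · rw [List.getElem?_set_ne (fun h => hj h.symm), ih hnd' hb' (idx + 1)]
      by_cases hjP : j ∈ P
      · simp only [hjP, if_true, List.mem_cons, or_true]
        have hidx : List.idxOf j (p :: P) = List.idxOf j P + 1 := by
          simp [Ne.symm hj]
        have harith : idx + 1 + (List.idxOf j P : Int) = idx + ((List.idxOf j P + 1 : Nat) : Int) := by
          push_cast; ring
        rw [hidx, harith]
      · have : ¬ j ∈ p :: P := by simp [hj, hjP]
        simp [hjP, this]

def pvPred (P : List Nat) (j : Nat) (kv : Int × String) : Bool :=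
  decide (0 ≤ kv.1 ∧ kv.1 < (P.length : Int) ∧ P.getD kv.1.toNat 0 = j)

theorem pvPred_key_eq (P : List Nat) (hP : P.Nodup) (j : Nat) {a b : Int × String}
    (ha : pvPred P j a = true) (hb : pvPred P j b = true) : a.1 = b.1 := by
  simp only [pvPred, decide_eq_true_eq] at ha hb
  have ha' : a.1.toNat < P.length := by omega
  have hb' : b.1.toNat < P.length := by omega
  have he : P[a.1.toNat] = P[b.1.toNat] := by
    rw [← List.getD_eq_getElem P 0 ha', ← List.getD_eq_getElem P 0 hb', ha.2.2, hb.2.2]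
  have := (List.Nodup.getElem_inj_iff hP).mp he
  omega

theorem pvFind?_unique {α : Type} (p : α → Bool) (l : List α) (a : α) (ha : a ∈ l)
    (hp : p a = true) (hu : ∀ x ∈ l, p x = true → x = a) : l.find? p = some a := by
  induction l with
  | nil => simp at ha
  | cons x l ih =>
    by_cases hx : p x = true
    · have hxa := hu x (by simp) hx
      subst hxa
      rw [List.find?_cons_of_pos hx]
    · rw [List.find?_cons_of_neg hx]
      have ha' : a ∈ l := by
        rcases List.mem_cons.1 ha with h | h
        · subst h; exact absurd hp hx
        · exact h
      exact ih ha' (fun y hy hpy => hu y (by simp [hy]) hpy)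

theorem pvBpatch_length (P : List Nat) (its : List (Int × String)) :
    ∀ ls : List String, (pvBpatch P ls its).length = ls.length := by
  induction its with
  | nil => intro ls; rfl
  | cons kv rest ih =>
    intro ls
    simp only [pvBpatch, List.foldl_cons]
    rw [show (List.foldl _ _ rest : List String) = pvBpatch P _ rest from rfl, ih]
    split <;> simp

theorem pvBpatch_getElem? (P : List Nat) (hP : P.Nodup) (its : List (Int × String))
    (hk : (its.map Prod.fst).Nodup) :
    ∀ (ls : List String) (j : Nat), j < ls.length →
    (pvBpatch P ls its)[j]? =
      match its.find? (pvPred P j) with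
      | some kv => some kv.2
      | none => ls[j]? := by
  induction its with
  | nil => intro ls j hj; simp [pvBpatch]
  | cons kv rest ih =>
    intro ls j hj
    have hk' : (rest.map Prod.fst).Nodup := by simp at hk; exact hk.2
    set ls' := if 0 ≤ kv.1 ∧ kv.1 < (P.length : Int) then ls.set (P.getD kv.1.toNat 0) kv.2 else ls with hls'
    have hlen' : ls'.length = ls.length := by rw [hls']; split <;> simp
    have hstep : pvBpatch P ls (kv :: rest) = pvBpatch P ls' rest := rfl
    rw [hstep, ih hk' ls' j (by omega)]
    by_cases hpred : pvPred P j kv = true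
    · rw [List.find?_cons_of_pos hpred]
      have hrest : rest.find? (pvPred P j) = none := by
        apply List.find?_eq_none.mpr
        intro x hx hpx
        have := pvPred_key_eq P hP j hpx hpred
        simp only [List.map_cons, List.nodup_cons] at hk
        exact hk.1 (this ▸ List.mem_map_of_mem hx)
      rw [hrest]
      simp only [pvPred, decide_eq_true_eq] at hpred
      have : ls' = ls.set j kv.2 := by rw [hls', if_pos ⟨hpred.1, hpred.2.1⟩, hpred.2.2]
      rw [this, List.getElem?_set_self (by simpa using hj)]
    · rw [List.find?_cons_of_neg hpred]
      cases hfind : rest.find? (pvPred P j) with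
      | some kv' => simp
      | none =>
        simp only []
        have : ls'[j]? = ls[j]? := by
          rw [hls']
          split
          · rename_i hg
            apply List.getElem?_set_ne
            intro he
            exact hpred (by simp [pvPred]; exact ⟨hg.1, hg.2, he⟩)
          · rfl
        rw [this]

theorem pvMain (d : PySem.Dict Int String) (hnd : d.keys.Nodup) (ls : List String) :
    pvAgo d ls false 0 = pvBpatch (pvBpos ls 0 false) ls d.items := by
  set P := pvBpos ls 0 false with hPdef
  have hPnd : P.Nodup := (pvBpos_pairwise ls 0 false).nodup
  have hPb : ∀ p ∈ P, p < ls.length := fun p hp => by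
    have := pvBpos_bounds ls 0 false p hp; omega
  have hk : (d.items.map Prod.fst).Nodup := hnd
  apply List.ext_getElem?
  intro j
  by_cases hj : j < ls.length
  · rw [pvAgo_eq_apply d ls false 0 0, ← hPdef,
      pvApply_getElem? d ls P hPnd hPb 0 j,
      pvBpatch_getElem? P hPnd d.items hk ls j hj]
    by_cases hjP : j ∈ P
    · rw [if_pos hjP]
      have hm : P.idxOf j < P.length := List.idxOf_lt_length_of_mem hjP
      have hPm : P[P.idxOf j] = j := List.getElem_idxOf hm
      have hpredm : ∀ v, pvPred P j ((P.idxOf j : Int), v) = true := by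
        intro v
        simp only [pvPred, decide_eq_true_eq]
        refine ⟨by positivity, by exact_mod_cast hm, ?_⟩
        rw [Int.toNat_natCast, List.getD_eq_getElem P 0 hm]
        exact hPm
      cases hget : d.get? (P.idxOf j : Int) with
      | some v =>
        have hmem : ((P.idxOf j : Int), v) ∈ d.items := PySem.Dict.mem_items_of_get?_eq_some d hget
        have hfind : d.items.find? (pvPred P j) = some ((P.idxOf j : Int), v) := by
          apply pvFind?_unique _ _ _ hmem (hpredm v)
          intro x hx hpx
          have hx1 : x.1 = (P.idxOf j : Int) := pvPred_key_eq P hPnd j hpx (hpredm v)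
          have : d.get? x.1 = some x.2 := PySem.Dict.get?_of_mem_items d (by simpa using hx) hnd
          rw [hx1, hget] at this
          have hv : x.2 = v := by injection this with h; exact h.symm
          exact Prod.ext hx1 hv
        rw [hfind]
        simp only [zero_add]
        rw [PySem.Dict.getD_of_get?_eq_some d _ hget]
      | none =>
        have hfind : d.items.find? (pvPred P j) = none := by
          apply List.find?_eq_none.mpr
          intro x hx hpx
          have hx1 : x.1 = (P.idxOf j : Int) := pvPred_key_eq P hPnd j hpx (hpredm "")
          have hg : d.get? x.1 = some x.2 := PySem.Dict.get?_of_mem_items d (by simpa using hx) hnd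
          rw [hx1, hget] at hg
          simp at hg
        rw [hfind]
        simp only [zero_add]
        rw [PySem.Dict.getD_of_get?_eq_none d _ hget]
        rw [List.getD_eq_getElem ls "" hj, List.getElem?_eq_getElem hj]
    · rw [if_neg hjP]
      have hfind : d.items.find? (pvPred P j) = none := by
        apply List.find?_eq_none.mpr
        intro x hx hpx
        simp only [pvPred, decide_eq_true_eq] at hpx
        have hx' : x.1.toNat < P.length := by omega
        have : P[x.1.toNat] = j := by
          rw [← List.getD_eq_getElem P 0 hx']; exact hpx.2.2
        exact hjP (this ▸ List.getElem_mem hx')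
      rw [hfind]
  · have h1 : (pvAgo d ls false 0).length ≤ j := by
      rw [pvAgo_eq_apply d ls false 0 0, ← hPdef, pvApply_length]; omega
    have h2 : (pvBpatch P ls d.items).length ≤ j := by rw [pvBpatch_length]; omega
    rw [List.getElem?_eq_none h1, List.getElem?_eq_none h2]

theorem replace_updated_hitobject_lines_spec : Claim_equal_replace_updated_hitobject_lines := by
  intro content updated_indexes _
  show replace_updated_hitobject_lines content updated_indexes = replace_updated_hitobject_lines_alt content updated_indexes
  unfold replace_updated_hitobject_lines replace_updated_hitobject_lines_alt
  rw [pvMain _ (PySem.Dict.nodup_keys_ofList updated_indexes)]
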